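-- pv_equiv track=rewrite | github.com/HE02737964/Simulator | proposed.py | dfs
-- ===== SOURCE A (Python) =====
-- def dfs(node, graph, endPoint, chooseList, vis, path, longestPath):
--     vis[node] = True
--     if node in endPoint or node not in chooseList:
--         p = path.copy()
--         longestPath.append(p)
--     else:
--         path.append(node)
--         for i in graph[node]:
--             if not vis[i]:
--                 dfs(i, graph, endPoint, chooseList, vis, path, longestPath)
--         p = path.copy()
--         longestPath.append(p)
--         path.pop()
--         vis[node] = False
--
--     return longestPath
-- ===== SOURCE B (Python) =====
-- # Pure recursive reformulation: threads an immutable "blocked" set and builds the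
-- # snapshot list by concatenation of return values instead of mutating vis/path in
-- # place.  Equivalence with the original is about the RETURN value (and the
-- # appends to longestPath); the original also mutates vis and path, B does not.
-- def dfs(node, graph, endPoint, chooseList, vis, path, longestPath):
--     def walk(n, blocked, trail):
--         if n in endPoint or n not in chooseList:
--             return [list(trail)], blocked | {n}
--         b = blocked | {n}
--         snaps = []
--         for nb in graph[n]:
--             if nb not in b:
--                 s, b = walk(nb, b, trail + [n])
--                 snaps += s
--         snaps.append(trail + [n])
--         return snaps, b - {n}
--
--     snaps, _ = walk(node, {k for k, v in vis.items() if v}, path)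
--     longestPath.extend(snaps)
--     return longestPath
-- ===== Notes on version B (the rewrite author's own statement) =====
-- stated objective: alternative
-- what changed: Replaces the in-place mutation of vis/path/longestPath by a pure recursion that threads an immutable blocked-set and builds the snapshot list by concatenating return values (same traversal and snapshot order, no side effects on vis/path).
import Mathlib
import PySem

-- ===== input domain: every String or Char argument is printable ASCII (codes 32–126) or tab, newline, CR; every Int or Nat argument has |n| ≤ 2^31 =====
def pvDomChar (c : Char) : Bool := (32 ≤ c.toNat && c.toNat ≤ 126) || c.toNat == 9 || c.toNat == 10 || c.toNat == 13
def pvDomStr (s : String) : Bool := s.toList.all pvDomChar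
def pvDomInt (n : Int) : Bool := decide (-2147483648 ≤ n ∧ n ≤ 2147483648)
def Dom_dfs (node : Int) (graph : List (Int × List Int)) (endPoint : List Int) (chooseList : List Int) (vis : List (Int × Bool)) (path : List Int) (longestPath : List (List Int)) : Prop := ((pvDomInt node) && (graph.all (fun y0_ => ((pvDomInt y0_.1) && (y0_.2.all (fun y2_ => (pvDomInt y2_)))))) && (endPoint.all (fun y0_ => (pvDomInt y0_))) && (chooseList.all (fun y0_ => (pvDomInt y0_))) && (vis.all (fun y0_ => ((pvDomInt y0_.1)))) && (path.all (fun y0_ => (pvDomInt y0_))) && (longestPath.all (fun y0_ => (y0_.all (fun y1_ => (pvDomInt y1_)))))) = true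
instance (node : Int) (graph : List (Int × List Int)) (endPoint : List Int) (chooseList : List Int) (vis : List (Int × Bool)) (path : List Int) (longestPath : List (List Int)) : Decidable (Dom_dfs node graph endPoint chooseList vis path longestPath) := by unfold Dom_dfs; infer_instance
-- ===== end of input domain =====

-- B is a pure recursive reformulation of A's backtracking DFS (same snapshot order);
-- the equivalence proved is about the RETURN value: A also mutates vis/path in place, B does not.

-- shared helper: 'node in endPoint or node not in chooseList' (identical in both Pythons)
def pvTerminal (endPoint chooseList : List Int) (n : Int) : Bool :=
  endPoint.contains n || !(chooseList.contains n)

-- ===== PORT A =====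
-- The recursion is fuelled for totality only: under Pre_dfs every simple DFS chain
-- visits pairwise-distinct keys of vis (plus possibly the start node), so fuel
-- vis.length + 1 is never exhausted.
-- graph[node] / vis[i] are read with getD: the KeyError cases are excluded by Pre_dfs.
def dfsRecA (graph : PySem.Dict Int (List Int)) (endPoint chooseList : List Int) :
    Nat → Int → PySem.Dict Int Bool → List Int → List (List Int) →
    PySem.Dict Int Bool × List Int × List (List Int)
  | 0, _, v, p, l => (v, p, l)
  | fuel+1, n, v, p, l =>
    let v1 := v.insert n true                                -- vis[node] = True
    if pvTerminal endPoint chooseList n then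
      (v1, p, l ++ [p])                                      -- longestPath.append(path.copy())
    else
      let p1 := p ++ [n]                                     -- path.append(node)
      let s := (graph.getD n []).foldl                       -- for i in graph[node]:
        (fun (st : PySem.Dict Int Bool × List Int × List (List Int)) i =>
          if !(st.1.getD i false) then                       --   if not vis[i]:
            dfsRecA graph endPoint chooseList fuel i st.1 st.2.1 st.2.2
          else st)
        (v1, p1, l)
      -- longestPath.append(path.copy()); path.pop(); vis[node] = False
      (s.1.insert n false, s.2.1.dropLast, s.2.2 ++ [s.2.1])

def dfs (node : Int) (graph : List (Int × List Int)) (endPoint : List Int) (chooseList : List Int) (vis : List (Int × Bool)) (path : List Int) (longestPath : List (List Int)) : List (List Int) :=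
  (dfsRecA (PySem.Dict.mk graph) endPoint chooseList (vis.length + 1) node
    (PySem.Dict.mk vis) path longestPath).2.2

-- ===== PORT B =====
-- walk(n, blocked, trail) from Source B, fuelled exactly like A's port for totality.
def walkB (graph : PySem.Dict Int (List Int)) (endPoint chooseList : List Int) :
    Nat → Int → PySem.Set Int → List Int → List (List Int) × PySem.Set Int
  | 0, _, b, _ => ([], b)
  | fuel+1, n, b, trail =>
    if pvTerminal endPoint chooseList n then
      ([trail], PySem.Set.add b n)
    else
      let r := (graph.getD n []).foldl                       -- for nb in graph[n]:
        (fun (acc : List (List Int) × PySem.Set Int) nb =>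
          if !(PySem.Set.contains acc.2 nb) then             --   if nb not in b:
            let w := walkB graph endPoint chooseList fuel nb acc.2 (trail ++ [n])
            (acc.1 ++ w.1, w.2)
          else acc)
        ([], PySem.Set.add b n)
      (r.1 ++ [trail ++ [n]], PySem.Set.diff r.2 [n])        -- snaps.append(trail+[n]); b - {n}

def dfs_alt (node : Int) (graph : List (Int × List Int)) (endPoint : List Int) (chooseList : List Int) (vis : List (Int × Bool)) (path : List Int) (longestPath : List (List Int)) : List (List Int) :=
  longestPath ++
    (walkB (PySem.Dict.mk graph) endPoint chooseList (vis.length + 1) node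
      (PySem.Set.ofList ((vis.filter (fun q => q.2)).map Prod.fst)) path).1

-- ===== PRECONDITION & SPEC =====
-- pvEntered computes (as a plain graph-reachability fixpoint, NOT the ports' backtracking
-- recursion) exactly the set of nodes A's run enters: the start node plus every node
-- reachable from it through non-terminal nodes along edges whose target has an entry
-- 'i ↦ False' in vis (the start itself is never re-entered: A sets vis[node] = True first).
def pvEnterStep (graph : PySem.Dict Int (List Int)) (endPoint chooseList : List Int)
    (node : Int) (vis : PySem.Dict Int Bool) (E : PySem.Set Int) : PySem.Set Int :=
  E.foldl (fun acc m =>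
    if pvTerminal endPoint chooseList m then acc
    else (graph.getD m []).foldl (fun acc2 i =>
      if i ≠ node ∧ vis.get? i = some false then PySem.Set.add acc2 i else acc2) acc) E

def pvEntered (graph : PySem.Dict Int (List Int)) (endPoint chooseList : List Int)
    (node : Int) (vis : PySem.Dict Int Bool) : PySem.Set Int :=
  (pvEnterStep graph endPoint chooseList node vis)^[vis.size + 1] (PySem.Set.ofList [node])

-- Pre_dfs holds exactly where Python A returns normally (verified by fuzzing): A raises
-- KeyError iff some entered non-terminal node is missing from graph, or some neighbour it
-- scans is missing from vis and is not the start node.  The Nodup clause only rules out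
-- duplicate keys in the association list, which no Python dict can produce.
def Pre_dfs (node : Int) (graph : List (Int × List Int)) (endPoint : List Int) (chooseList : List Int) (vis : List (Int × Bool)) (path : List Int) (longestPath : List (List Int)) : Prop :=
  (vis.map Prod.fst).Nodup ∧
  ∀ m ∈ pvEntered (PySem.Dict.mk graph) endPoint chooseList node (PySem.Dict.mk vis),
    pvTerminal endPoint chooseList m = false →
      (PySem.Dict.mk graph).contains m = true ∧
      ∀ i ∈ (PySem.Dict.mk graph).getD m [],
        i = node ∨ (PySem.Dict.mk vis).contains i = true

instance (node : Int) (graph : List (Int × List Int)) (endPoint : List Int) (chooseList : List Int) (vis : List (Int × Bool)) (path : List Int) (longestPath : List (List Int)) : Decidable (Pre_dfs node graph endPoint chooseList vis path longestPath) := by unfold Pre_dfs; infer_instance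

def pvWitness_dfs : Int × (List (Int × List Int)) × List Int × List Int × (List (Int × Bool)) × List Int × List (List Int) :=
  (1, [(1, [2]), (2, [])], [], [1], [(1, false), (2, false)], [], [])

def Spec_dfs (node : Int) (graph : List (Int × List Int)) (endPoint : List Int) (chooseList : List Int) (vis : List (Int × Bool)) (path : List Int) (longestPath : List (List Int)) (out : List (List Int)) : Prop := out = dfs_alt node graph endPoint chooseList vis path longestPath
instance (node : Int) (graph : List (Int × List Int)) (endPoint : List Int) (chooseList : List Int) (vis : List (Int × Bool)) (path : List Int) (longestPath : List (List Int)) (out : List (List Int)) : Decidable (Spec_dfs node graph endPoint chooseList vis path longestPath out) := by unfold Spec_dfs; infer_instance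

-- ===== CLAIM (what is proved, stated in full; the proofs are below) =====
def Claim_equal_dfs : Prop := ∀ (node : Int) (graph : List (Int × List Int)) (endPoint : List Int) (chooseList : List Int) (vis : List (Int × Bool)) (path : List Int) (longestPath : List (List Int)), Dom_dfs node graph endPoint chooseList vis path longestPath → Pre_dfs node graph endPoint chooseList vis path longestPath → Spec_dfs node graph endPoint chooseList vis path longestPath (dfs node graph endPoint chooseList vis path longestPath)

-- ===== LEMMAS AND PROOFS =====

-- The state correspondence: the vis dict of A and the blocked set of B agree pointwise.
def pvR (v : PySem.Dict Int Bool) (b : PySem.Set Int) : Prop :=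
  ∀ k : Int, v.getD k false = PySem.Set.contains b k

theorem pvR_insert_true (v : PySem.Dict Int Bool) (b : PySem.Set Int) (n : Int)
    (h : pvR v b) : pvR (v.insert n true) (PySem.Set.add b n) := by
  intro k
  rw [PySem.Dict.getD_insert]
  rw [Bool.eq_iff_iff]
  constructor
  · intro hk
    rw [PySem.Set.contains_iff, PySem.Set.mem_add]
    split at hk
    · right; assumption
    · left; rw [← PySem.Set.contains_iff, ← h k]; exact hk
  · intro hk
    rw [PySem.Set.contains_iff, PySem.Set.mem_add] at hk
    split
    · rfl
    · rcases hk with hk | hk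
      · rw [h k, PySem.Set.contains_iff]; exact hk
      · omega

theorem pvR_insert_false (v : PySem.Dict Int Bool) (b : PySem.Set Int) (n : Int)
    (h : pvR v b) : pvR (v.insert n false) (PySem.Set.diff b [n]) := by
  intro k
  rw [PySem.Dict.getD_insert]
  rw [Bool.eq_iff_iff]
  constructor
  · intro hk
    split at hk
    · exact absurd hk (by simp)
    · rw [PySem.Set.contains_iff, PySem.Set.mem_diff]
      refine ⟨by rw [← PySem.Set.contains_iff, ← h k]; exact hk, by simpa using ‹¬ k = n›⟩
  · intro hk
    rw [PySem.Set.contains_iff, PySem.Set.mem_diff] at hk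
    split
    · exact absurd (by simpa using hk.2) (by simp_all)
    · rw [h k, PySem.Set.contains_iff]; exact hk.1

-- Main simulation: for EVERY fuel, A's fuelled recursion and B's fuelled walk agree:
-- A's longestPath is l ++ (B's snapshots), A restores path, the states stay related.
theorem walk_sim (g : PySem.Dict Int (List Int)) (e c : List Int) :
    ∀ (fuel : Nat) (n : Int) (v : PySem.Dict Int Bool) (b : PySem.Set Int)
      (p : List Int) (l : List (List Int)), pvR v b →
      (dfsRecA g e c fuel n v p l).2.2 = l ++ (walkB g e c fuel n b p).1 ∧
      (dfsRecA g e c fuel n v p l).2.1 = p ∧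
      pvR (dfsRecA g e c fuel n v p l).1 (walkB g e c fuel n b p).2 := by
  intro fuel
  induction fuel with
  | zero => intro n v b p l h; exact ⟨by simp [dfsRecA, walkB], rfl, h⟩
  | succ fuel ih =>
    intro n v b p l h
    by_cases ht : pvTerminal e c n = true
    · simp only [dfsRecA, walkB, ht, if_pos]
      exact ⟨trivial, trivial, pvR_insert_true v b n h⟩
    · have ht' : pvTerminal e c n = false := by simpa using ht
      have hfold : ∀ (ns : List Int) (v' : PySem.Dict Int Bool) (b' : PySem.Set Int)
          (s0 : List (List Int)), pvR v' b' →
          (ns.foldl (fun (st : PySem.Dict Int Bool × List Int × List (List Int)) i =>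
              if !(st.1.getD i false) then dfsRecA g e c fuel i st.1 st.2.1 st.2.2
              else st) (v', p ++ [n], l ++ s0)).2.2
            = l ++ (ns.foldl (fun (acc : List (List Int) × PySem.Set Int) nb =>
              if !(PySem.Set.contains acc.2 nb) then
                let w := walkB g e c fuel nb acc.2 (p ++ [n])
                (acc.1 ++ w.1, w.2)
              else acc) (s0, b')).1 ∧
          (ns.foldl (fun (st : PySem.Dict Int Bool × List Int × List (List Int)) i =>
              if !(st.1.getD i false) then dfsRecA g e c fuel i st.1 st.2.1 st.2.2
              else st) (v', p ++ [n], l ++ s0)).2.1 = p ++ [n] ∧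
          pvR (ns.foldl (fun (st : PySem.Dict Int Bool × List Int × List (List Int)) i =>
              if !(st.1.getD i false) then dfsRecA g e c fuel i st.1 st.2.1 st.2.2
              else st) (v', p ++ [n], l ++ s0)).1
            ((ns.foldl (fun (acc : List (List Int) × PySem.Set Int) nb =>
              if !(PySem.Set.contains acc.2 nb) then
                let w := walkB g e c fuel nb acc.2 (p ++ [n])
                (acc.1 ++ w.1, w.2)
              else acc) (s0, b')).2) := by
        intro ns
        induction ns with
        | nil => intro v' b' s0 h'; exact ⟨rfl, rfl, h'⟩
        | cons nb rest ihns =>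
          intro v' b' s0 h'
          simp only [List.foldl_cons]
          rw [h' nb]
          by_cases hnb : PySem.Set.contains b' nb = true
          · simp only [hnb, Bool.not_true, Bool.false_eq_true, if_false]
            exact ihns v' b' s0 h'
          · have hnb' : PySem.Set.contains b' nb = false := by simpa using hnb
            simp only [hnb', Bool.not_false, if_true]
            obtain ⟨h1, h2, h3⟩ := ih nb v' b' (p ++ [n]) (l ++ s0) h'
            have hst : dfsRecA g e c fuel nb v' (p ++ [n]) (l ++ s0)
                = ((dfsRecA g e c fuel nb v' (p ++ [n]) (l ++ s0)).1, p ++ [n],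
                   l ++ (s0 ++ (walkB g e c fuel nb b' (p ++ [n])).1)) := by
              conv_lhs => rw [show dfsRecA g e c fuel nb v' (p ++ [n]) (l ++ s0)
                = ((dfsRecA g e c fuel nb v' (p ++ [n]) (l ++ s0)).1,
                   (dfsRecA g e c fuel nb v' (p ++ [n]) (l ++ s0)).2.1,
                   (dfsRecA g e c fuel nb v' (p ++ [n]) (l ++ s0)).2.2) from rfl]
              rw [h1, h2, List.append_assoc]
            rw [hst]
            exact ihns (dfsRecA g e c fuel nb v' (p ++ [n]) (l ++ s0)).1
              ((walkB g e c fuel nb b' (p ++ [n])).2)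
              (s0 ++ (walkB g e c fuel nb b' (p ++ [n])).1) h3
      obtain ⟨h1, h2, h3⟩ := hfold (g.getD n []) (v.insert n true)
        (PySem.Set.add b n) [] (pvR_insert_true v b n h)
      rw [List.append_nil] at h1 h2 h3
      have hAeq : dfsRecA g e c (fuel+1) n v p l
          = (((g.getD n []).foldl (fun (st : PySem.Dict Int Bool × List Int × List (List Int)) i =>
              if !(st.1.getD i false) then dfsRecA g e c fuel i st.1 st.2.1 st.2.2
              else st) (v.insert n true, p ++ [n], l)).1.insert n false,
             ((g.getD n []).foldl (fun (st : PySem.Dict Int Bool × List Int × List (List Int)) i =>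
              if !(st.1.getD i false) then dfsRecA g e c fuel i st.1 st.2.1 st.2.2
              else st) (v.insert n true, p ++ [n], l)).2.1.dropLast,
             ((g.getD n []).foldl (fun (st : PySem.Dict Int Bool × List Int × List (List Int)) i =>
              if !(st.1.getD i false) then dfsRecA g e c fuel i st.1 st.2.1 st.2.2
              else st) (v.insert n true, p ++ [n], l)).2.2
             ++ [((g.getD n []).foldl (fun (st : PySem.Dict Int Bool × List Int × List (List Int)) i =>
              if !(st.1.getD i false) then dfsRecA g e c fuel i st.1 st.2.1 st.2.2
              else st) (v.insert n true, p ++ [n], l)).2.1]) := by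
        simp only [dfsRecA, ht', Bool.false_eq_true, if_false]
      have hBeq : walkB g e c (fuel+1) n b p
          = (((g.getD n []).foldl (fun (acc : List (List Int) × PySem.Set Int) nb =>
              if !(PySem.Set.contains acc.2 nb) then
                let w := walkB g e c fuel nb acc.2 (p ++ [n])
                (acc.1 ++ w.1, w.2)
              else acc) ([], PySem.Set.add b n)).1 ++ [p ++ [n]],
             PySem.Set.diff ((g.getD n []).foldl (fun (acc : List (List Int) × PySem.Set Int) nb =>
              if !(PySem.Set.contains acc.2 nb) then
                let w := walkB g e c fuel nb acc.2 (p ++ [n])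
                (acc.1 ++ w.1, w.2)
              else acc) ([], PySem.Set.add b n)).2 [n]) := by
        simp only [walkB, ht', Bool.false_eq_true, if_false]
      refine ⟨?_, ?_, ?_⟩
      · rw [hAeq, hBeq]
        simp only
        rw [h1, h2, List.append_assoc]
      · rw [hAeq]
        simp only
        rw [h2, List.dropLast_concat]
      · rw [hAeq, hBeq]
        exact pvR_insert_false _ _ _ h3

-- initial correspondence: the dict built from vis vs the set of its true keys
theorem pvR_init (vis : List (Int × Bool)) (hnd : (vis.map Prod.fst).Nodup) :
    pvR (PySem.Dict.mk vis) (PySem.Set.ofList ((vis.filter (fun q => q.2)).map Prod.fst)) := by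
  intro k
  induction vis with
  | nil =>
    rw [Bool.eq_iff_iff]
    simp [PySem.Dict.getD_eq_get?_getD, PySem.Dict.get?]
  | cons q rest ihv =>
    obtain ⟨a, bv⟩ := q
    simp only [List.map_cons, List.nodup_cons] at hnd
    have hrest := ihv hnd.2
    rw [PySem.Dict.getD_eq_get?_getD] at hrest ⊢
    rw [PySem.Dict.get?_mk_cons]
    by_cases hk : a = k
    · subst hk
      rw [show (a == a) = true from by simp]
      cases bv with
      | true =>
        rw [Bool.eq_iff_iff]
        simp [PySem.Set.mem_ofList]
      | false =>
        rw [Bool.eq_iff_iff]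
        simp only [if_true, Option.getD_some, List.filter_cons, Bool.false_eq_true,
          if_false, PySem.Set.contains_iff, PySem.Set.mem_ofList,
          List.mem_map, List.mem_filter]
        constructor
        · intro hfalse; exact absurd hfalse (by simp)
        · rintro ⟨r, ⟨hr, _⟩, hr1⟩
          exact absurd (hr1 ▸ List.mem_map_of_mem hr) hnd.1
    · rw [show (a == k) = false from by simpa using hk]
      simp only [Bool.false_eq_true, if_false, List.filter_cons]
      cases bv with
      | true =>
        rw [hrest, Bool.eq_iff_iff]
        simp only [if_true, List.map_cons, PySem.Set.contains_iff,
          PySem.Set.mem_ofList, List.mem_cons]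
        constructor
        · intro hx; exact Or.inr hx
        · rintro (hx | hx)
          · exact absurd hx.symm hk
          · exact hx
      | false =>
        rw [hrest]
        simp

-- ===== VERDICT (by name: the statement is the Claim_ definition above) =====
theorem dfs_spec : Claim_equal_dfs := by
  intro node graph endPoint chooseList vis path longestPath _ hpre
  obtain ⟨hnd, _⟩ := hpre
  unfold Spec_dfs dfs dfs_alt
  exact (walk_sim (PySem.Dict.mk graph) endPoint chooseList (vis.length + 1) node
    (PySem.Dict.mk vis)
    (PySem.Set.ofList ((vis.filter (fun q => q.2)).map Prod.fst)) path longestPath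
    (pvR_init vis hnd)).1
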